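-- pv_equiv track=rewrite | github.com/VikasViki/LeetCode-Code-Submissions | 1818-maximum-score-from-removing-substrings/maximum-score-from-removing-substrings.py | find_substring_count
-- ===== SOURCE A (Python) =====
-- def find_substring_count(string, substring):
--     if not string:
--         return 0, ""
--
--     stack = [string[0]]
--     substring_count = 0
--     for char in string[1:]:
--         if stack and stack[-1] + char == substring:
--                 substring_count += 1
--                 stack.pop()
--         else:
--             stack.append(char)
--
--     return substring_count, "".join(stack)
-- ===== SOURCE B (Python) =====
-- def find_substring_count(string, substring):
--     # Whole-string fixpoint deletion: removing a fixed 2-char pattern is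
--     # confluent, so repeated replace() reaches the same normal form as the
--     # stack pass; the count is determined by the length difference.
--     if len(substring) != 2:
--         return 0, string
--     result = string
--     while substring in result:
--         result = result.replace(substring, "")
--     return (len(string) - len(result)) // 2, result
-- ===== Notes on version B (the rewrite author's own statement) =====
-- stated objective: faster
-- what changed: Replaces the per-character stack pass with repeated whole-string str.replace() to a fixpoint (deletion of a fixed 2-char pattern is confluent, so the fixpoint equals the stack's normal form), recovering the count from the length difference.
import Mathlib
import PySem

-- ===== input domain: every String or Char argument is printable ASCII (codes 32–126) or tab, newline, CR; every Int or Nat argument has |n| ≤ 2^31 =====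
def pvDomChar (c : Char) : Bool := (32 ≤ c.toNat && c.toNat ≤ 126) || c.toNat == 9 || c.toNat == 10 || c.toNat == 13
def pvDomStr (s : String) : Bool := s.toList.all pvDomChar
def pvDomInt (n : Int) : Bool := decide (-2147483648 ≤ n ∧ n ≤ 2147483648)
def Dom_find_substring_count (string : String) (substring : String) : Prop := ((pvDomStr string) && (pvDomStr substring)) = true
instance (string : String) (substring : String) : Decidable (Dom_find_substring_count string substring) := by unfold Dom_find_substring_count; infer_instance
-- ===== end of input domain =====

-- ===== PORT A =====
-- B replaces A's single stack pass by repeated whole-string replace() to a fixpoint; same return value everywhere.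
def pvStepA (sub : List Char) (p : List Char × Int) (ch : Char) : List Char × Int :=
  match p.1.getLast? with
  | some top => if [top, ch] = sub then (p.1.dropLast, p.2 + 1) else (p.1 ++ [ch], p.2)
  | none => (p.1 ++ [ch], p.2)

def find_substring_count (string : String) (substring : String) : Int × String :=
  match string.toList with
  | [] => (0, "")
  | c :: rest =>
      let r := rest.foldl (pvStepA substring.toList) ([c], 0)
      (r.2, String.ofList r.1)

-- ===== PORT B =====
def pvLoopB (sub : List Char) : Nat → List Char → List Char
  | 0, r => r
  | fuel+1, r =>
      if PySem.Chars.isIn sub r then pvLoopB sub fuel (PySem.Chars.replace r sub []) else r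

def find_substring_count_alt (string : String) (substring : String) : Int × String :=
  if substring.toList.length ≠ 2 then (0, string)
  else
    let result := pvLoopB substring.toList (string.toList.length + 1) string.toList
    (PySem.Int.floordiv ((string.toList.length : Int) - (result.length : Int)) 2,
     String.ofList result)

-- ===== PRECONDITION & SPEC =====
def Spec_find_substring_count (string : String) (substring : String) (out : Int × String) : Prop := out = find_substring_count_alt string substring
instance (string : String) (substring : String) (out : Int × String) : Decidable (Spec_find_substring_count string substring out) := by unfold Spec_find_substring_count; infer_instance

-- ===== CLAIM (what is proved, stated in full; the proofs are below) =====
def Claim_equal_find_substring_count : Prop := ∀ (string : String) (substring : String), Dom_find_substring_count string substring → Spec_find_substring_count string substring (find_substring_count string substring)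

-- ===== LEMMAS AND PROOFS =====

-- stack-only version of A's loop step, and the "no adjacent pair forms the pattern" relation
def pvStep (sub : List Char) (st : List Char) (ch : Char) : List Char :=
  match st.getLast? with
  | some top => if [top, ch] = sub then st.dropLast else st ++ [ch]
  | none => st ++ [ch]

def pvOk (sub : List Char) (x y : Char) : Prop := [x, y] ≠ sub

-- A's paired fold projects to the stack-only fold
theorem pvFoldA_fst (sub : List Char) (l : List Char) (st : List Char) (c : Int) :
    (l.foldl (pvStepA sub) (st, c)).1 = l.foldl (pvStep sub) st := by
  induction l generalizing st c with
  | nil => rfl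
  | cons x t ih =>
      simp only [List.foldl_cons]
      cases h : st.getLast? with
      | none => simpa [pvStepA, pvStep, h] using ih _ _
      | some top =>
          by_cases he : [top, x] = sub <;> simp [pvStepA, pvStep, h, he, ih]

-- invariant: 2·count + |stack| = 2·c₀ + |stack₀| + number of consumed chars
theorem pvFoldA_snd (sub : List Char) (l : List Char) (st : List Char) (c : Int) :
    2 * (l.foldl (pvStepA sub) (st, c)).2 + ((l.foldl (pvStepA sub) (st, c)).1.length : Int)
      = 2 * c + st.length + l.length := by
  induction l generalizing st c with
  | nil => simp
  | cons x t ih =>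
      simp only [List.foldl_cons, List.length_cons]
      cases h : st.getLast? with
      | none =>
          simp only [pvStepA, h]
          have := ih (st ++ [x]) c
          simp only [List.length_append, List.length_singleton] at this
          push_cast at this ⊢
          omega
      | some top =>
          by_cases he : [top, x] = sub
          · have hne : st ≠ [] := by intro h0; simp [h0] at h
            have hpos : 1 ≤ st.length := List.length_pos_of_ne_nil hne
            simp only [pvStepA, h, he, if_pos]
            have := ih st.dropLast (c + 1)
            have hlen : st.dropLast.length = st.length - 1 := by simp
            rw [hlen] at this
            push_cast at this ⊢
            omega
          · simp only [pvStepA, h, he, ite_false]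
            have := ih (st ++ [x]) c
            simp only [List.length_append, List.length_singleton] at this
            push_cast at this ⊢
            omega

-- when the pattern is not 2 chars long, A's loop only appends and never counts
theorem pvFoldA_noop (sub : List Char) (h2 : sub.length ≠ 2) (l : List Char) (st : List Char) (c : Int) :
    l.foldl (pvStepA sub) (st, c) = (st ++ l, c) := by
  induction l generalizing st with
  | nil => simp
  | cons x t ih =>
      have step : pvStepA sub (st, c) x = (st ++ [x], c) := by
        cases h : st.getLast? with
        | none => simp [pvStepA, h]
        | some top =>
            have : [top, x] ≠ sub := by intro he; exact h2 (he ▸ rfl)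
            simp [pvStepA, h, this]
      rw [List.foldl_cons, step, ih (st ++ [x])]
      simp
-- one loop step preserves the adjacency invariant
theorem pvStep_chain (sub : List Char) (st : List Char) (ch : Char)
    (h : List.IsChain (pvOk sub) st) : List.IsChain (pvOk sub) (pvStep sub st ch) := by
  cases hl : st.getLast? with
  | none =>
      have hst : st = [] := by cases st <;> simp_all
      subst hst
      simp [pvStep]
  | some top =>
      by_cases he : [top, ch] = sub
      · simpa [pvStep, hl, he] using h.prefix (List.dropLast_prefix st)
      · simp only [pvStep, hl, he, ite_false]
        rw [List.isChain_append]
        refine ⟨h, by simp, ?_⟩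
        intro x hx y hy
        simp only [List.head?_cons, Option.mem_def, Option.some.injEq] at hy
        rw [hl] at hx
        simp only [Option.mem_def, Option.some.injEq] at hx
        subst hx; subst hy
        exact he

-- on a pattern-free suffix the loop only appends
theorem pvFold_id (sub : List Char) (l : List Char) (st : List Char)
    (h : List.IsChain (pvOk sub) (st ++ l)) : l.foldl (pvStep sub) st = st ++ l := by
  induction l generalizing st with
  | nil => simp
  | cons x t ih =>
      have step : pvStep sub st x = st ++ [x] := by
        cases hl : st.getLast? with
        | none => simp [pvStep, hl]
        | some top =>
            have hok : [top, x] ≠ sub := by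
              have := (List.isChain_append.mp h).2.2 top (by rw [hl]; rfl) x rfl
              exact this
            simp [pvStep, hl, hok]
      rw [List.foldl_cons, step, ih (st ++ [x]) (by simpa using h)]
      simp

-- deleting one occurrence of the pattern does not change the loop's final stack
theorem pvFold_delete (a b : Char) (u v : List Char) (st : List Char)
    (h : List.IsChain (pvOk [a, b]) st) :
    (u ++ [a, b] ++ v).foldl (pvStep [a, b]) st = (u ++ v).foldl (pvStep [a, b]) st := by
  induction u generalizing st with
  | cons x t ih =>
      simpa using ih (pvStep [a, b] st x) (pvStep_chain _ st x h)
  | nil =>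
      simp only [List.nil_append, List.cons_append, List.foldl_cons]
      cases hl : st.getLast? with
      | none =>
          have hst : st = [] := by cases st <;> simp_all
          subst hst
          simp [pvStep]
      | some top =>
          by_cases he : [top, a] = [a, b]
          · -- then the pattern is [a,a] and the stack top is a
            obtain ⟨h1, h3⟩ : top = a ∧ a = b := by simpa using he
            subst h1
            subst h3
            have hne : st ≠ [] := by intro h0; simp [h0] at hl
            have hsplit : st.dropLast ++ [top] = st := List.dropLast_append_getLast? top hl
            rw [show pvStep [top, top] st top = st.dropLast by simp [pvStep, hl]]
            have hstep2 : pvStep [top, top] st.dropLast top = st := by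
              cases h4 : st.dropLast.getLast? with
              | none => simpa [pvStep, h4] using hsplit
              | some t' =>
                  have hok : [t', top] ≠ [top, top] := by
                    rw [← hsplit] at h
                    exact (List.isChain_append.mp h).2.2 t' (by rw [h4]; rfl) top rfl
                  simpa [pvStep, h4, hok] using hsplit
            rw [hstep2]
          · rw [show pvStep [a, b] st a = st ++ [a] by simp [pvStep, hl, he]]
            have : (st ++ [a]).getLast? = some a := by simp
            rw [show pvStep [a, b] (st ++ [a]) b = st by simp [pvStep, this]]

-- folding the result of one replace() pass equals folding the original string
theorem pvFold_go (a b : Char) (fuel : Nat) (l acc : List Char) :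
    (PySem.Chars.replace.go [a, b] [] fuel l acc).foldl (pvStep [a, b]) []
      = (acc.reverse ++ l).foldl (pvStep [a, b]) [] := by
  induction fuel generalizing l acc with
  | zero => simp [PySem.Chars.replace.go]
  | succ n ih =>
      cases l with
      | nil => simp [PySem.Chars.replace.go]
      | cons c t =>
          rw [PySem.Chars.replace.go.eq_def]
          by_cases hp : List.isPrefixOf [a, b] (c :: t) = true
          · obtain ⟨u, hu⟩ := List.isPrefixOf_iff_prefix.mp hp
            have hu' : c :: t = a :: b :: u := by simpa using hu.symm
            obtain ⟨hc, ht⟩ : c = a ∧ t = b :: u := by simpa using hu'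
            simp only [hp, if_true, List.reverse_nil, List.nil_append]
            rw [show List.drop [a, b].length (c :: t) = u by simp [ht]]
            rw [ih u acc]
            rw [hc, ht]
            have hdel := pvFold_delete a b acc.reverse u [] (by simp)
            simpa using hdel.symm
          · simp only [hp, if_false, Bool.false_eq_true, List.reverse_nil]
            rw [ih t (c :: acc)]
            simp

theorem pvFold_replace (a b : Char) (l : List Char) :
    (PySem.Chars.replace l [a, b] []).foldl (pvStep [a, b]) [] = l.foldl (pvStep [a, b]) [] := by
  have hr : PySem.Chars.replace l [a, b] [] = PySem.Chars.replace.go [a, b] [] l.length l [] := by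
    simp [PySem.Chars.replace]
  rw [hr, pvFold_go]
  simp

-- replace() never lengthens the string
theorem pvGo_len (sub : List Char) (fuel : Nat) (l acc : List Char) :
    (PySem.Chars.replace.go sub [] fuel l acc).length ≤ acc.length + l.length := by
  induction fuel generalizing l acc with
  | zero => simp [PySem.Chars.replace.go, Nat.add_comm]
  | succ n ih =>
      cases l with
      | nil => simp [PySem.Chars.replace.go]
      | cons c t =>
          rw [PySem.Chars.replace.go.eq_def]
          by_cases hp : List.isPrefixOf sub (c :: t) = true
          · simp only [hp, if_true, List.reverse_nil, List.nil_append]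
            have := ih (List.drop sub.length (c :: t)) acc
            have hd : (List.drop sub.length (c :: t)).length ≤ (c :: t).length := by
              simp [List.length_drop]
            omega
          · simp only [hp, if_false, Bool.false_eq_true]
            have := ih t (c :: acc)
            simp only [List.length_cons] at this ⊢
            omega

-- a successful replace() pass shortens the string by at least 2
theorem pvGo_len_lt (sub : List Char) (h2 : sub.length = 2) (fuel : Nat) (l acc : List Char)
    (hf : l.length ≤ fuel) (hin : sub <:+: l) :
    (PySem.Chars.replace.go sub [] fuel l acc).length + 2 ≤ acc.length + l.length := by
  induction fuel generalizing l acc with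
  | zero =>
      have : l = [] := by cases l <;> simp_all
      subst this
      rw [List.infix_nil] at hin
      simp [hin] at h2
  | succ n ih =>
      cases l with
      | nil =>
          rw [List.infix_nil] at hin
          simp [hin] at h2
      | cons c t =>
          rw [PySem.Chars.replace.go.eq_def]
          by_cases hp : List.isPrefixOf sub (c :: t) = true
          · simp only [hp, if_true, List.reverse_nil, List.nil_append]
            have hlen2 : 2 ≤ (c :: t).length := by
              have := (List.isPrefixOf_iff_prefix.mp hp).length_le
              omega
            have := pvGo_len sub n (List.drop sub.length (c :: t)) acc
            have hd : (List.drop sub.length (c :: t)).length = (c :: t).length - 2 := by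
              simp [h2]
            omega
          · simp only [hp, if_false, Bool.false_eq_true]
            have hnt : sub <:+: t := by
              rcases List.infix_cons_iff.mp hin with hpre | h'
              · exact absurd (List.isPrefixOf_iff_prefix.mpr hpre) (by simpa using hp)
              · exact h'
            have := ih t (c :: acc) (by simp at hf ⊢; omega) hnt
            simp only [List.length_cons] at this ⊢
            omega

theorem pvReplace_len (sub : List Char) (h2 : sub.length = 2) (l : List Char)
    (hin : PySem.Chars.isIn sub l = true) :
    (PySem.Chars.replace l sub []).length + 2 ≤ l.length := by
  have hne : sub ≠ [] := by intro h; simp [h] at h2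
  have hr : PySem.Chars.replace l sub [] = PySem.Chars.replace.go sub [] l.length l [] := by
    simp [PySem.Chars.replace, hne]
  rw [hr]
  simpa using pvGo_len_lt sub h2 l.length l [] le_rfl ((PySem.Chars.isIn_iff_infix _ _).mp hin)

-- B's fixpoint loop keeps the loop-stack value of the string
theorem pvLoopB_fold (a b : Char) (n : Nat) (r : List Char) :
    (pvLoopB [a, b] n r).foldl (pvStep [a, b]) [] = r.foldl (pvStep [a, b]) [] := by
  induction n generalizing r with
  | zero => rfl
  | succ n ih =>
      by_cases h : PySem.Chars.isIn [a, b] r = true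
      · rw [pvLoopB, if_pos h, ih, pvFold_replace]
      · rw [pvLoopB, if_neg (by simpa using h)]

-- with enough fuel the loop reaches a pattern-free fixpoint
theorem pvLoopB_fix (sub : List Char) (h2 : sub.length = 2) (n : Nat) (r : List Char)
    (hf : r.length < 2 * n) : PySem.Chars.isIn sub (pvLoopB sub n r) = false := by
  induction n generalizing r with
  | zero => omega
  | succ n ih =>
      by_cases h : PySem.Chars.isIn sub r = true
      · rw [pvLoopB, if_pos h]
        exact ih _ (by have := pvReplace_len sub h2 r h; omega)
      · rw [pvLoopB, if_neg (by simpa using h)]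
        exact Bool.eq_false_iff.mpr h

-- pattern-free (as a substring) means the adjacency invariant holds
theorem pvNoInfix_chain (a b : Char) (l : List Char)
    (h : ¬ [a, b] <:+: l) : List.IsChain (pvOk [a, b]) l := by
  induction l with
  | nil => simp
  | cons x t ih =>
      have hnt : ¬ [a, b] <:+: t := fun hh => h (List.infix_cons hh)
      cases t with
      | nil => simp
      | cons y t' =>
          rw [List.isChain_cons_cons]
          refine ⟨?_, ih hnt⟩
          intro he
          obtain ⟨rfl, rfl⟩ : x = a ∧ y = b := by simpa using he
          exact h ⟨[], t', rfl⟩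

-- ===== VERDICT (by name: the statement is the Claim_ definition above) =====
theorem find_substring_count_spec : Claim_equal_find_substring_count := by
  intro string substring _
  unfold Spec_find_substring_count
  by_cases h2 : substring.toList.length = 2
  · obtain ⟨a, b, hab⟩ := List.length_eq_two.mp h2
    have hfix : PySem.Chars.isIn [a, b] (pvLoopB [a, b] (string.toList.length + 1) string.toList) = false :=
      pvLoopB_fix [a, b] rfl _ _ (by omega)
    have hid : (pvLoopB [a, b] (string.toList.length + 1) string.toList).foldl (pvStep [a, b]) []
        = pvLoopB [a, b] (string.toList.length + 1) string.toList := by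
      simpa using pvFold_id [a, b] (pvLoopB [a, b] (string.toList.length + 1) string.toList) []
        (by simpa using pvNoInfix_chain a b _ ((PySem.Chars.isIn_eq_false_iff _ _).mp hfix))
    have hres : pvLoopB [a, b] (string.toList.length + 1) string.toList
        = string.toList.foldl (pvStep [a, b]) [] := by
      rw [← hid, pvLoopB_fold]
    rw [find_substring_count_alt, if_neg (not_not_intro h2)]
    simp only [hab, hres]
    cases hs : string.toList with
    | nil =>
        simp only [find_substring_count, hs, List.foldl_nil, List.length_nil]
        decide
    | cons c rest =>
        simp only [find_substring_count, hs, hab]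
        have hfst : (rest.foldl (pvStepA [a, b]) ([c], 0)).1 = (c :: rest).foldl (pvStep [a, b]) [] := by
          rw [pvFoldA_fst]
          simp [pvStep]
        have hsnd := pvFoldA_snd [a, b] rest [c] 0
        rw [← hfst, Prod.mk.injEq]
        refine ⟨?_, rfl⟩
        have h2c : (((c :: rest).length : Int)) - ((rest.foldl (pvStepA [a, b]) ([c], 0)).1.length : Int)
            = 2 * (rest.foldl (pvStepA [a, b]) ([c], 0)).2 := by
          simp only [List.length_cons, List.length_nil] at hsnd ⊢
          push_cast at hsnd ⊢
          omega
        rw [h2c, PySem.Int.floordiv_eq_ediv_of_pos (by norm_num),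
          Int.mul_ediv_cancel_left _ (by norm_num)]
  · rw [find_substring_count_alt, if_pos h2]
    cases hs : string.toList with
    | nil =>
        have hstr : string = "" := by
          have h0 := congrArg String.ofList hs
          rw [String.ofList_toList] at h0
          simpa using h0
        simp only [find_substring_count, hs]
        rw [hstr]
    | cons c rest =>
        simp only [find_substring_count, hs, pvFoldA_noop _ h2]
        have h0 := congrArg String.ofList hs
        rw [String.ofList_toList] at h0
        rw [show String.ofList ([c] ++ rest) = string by rw [h0]; rfl]
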